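-- pv_equiv track=rewrite | github.com/Joaquin5362656/tp3 | librerias/funcionesGrafo.py | _obtener_etiqueta_mas_frecuente
-- ===== SOURCE A (Python) =====
-- def _obtener_etiqueta_mas_frecuente(adyacente, padres, label):
--
--     frecuencias = {}
--     mas_frecuente = label[padres[adyacente][0]]
--
--     for padre in padres[adyacente]:
--
--         if label[padre] not in frecuencias:
--             frecuencias[label[padre]] = 1
--         else:
--             frecuencias[label[padre]] = frecuencias[label[padre]] + 1
--
--         if frecuencias[label[padre]] > frecuencias[mas_frecuente]:
--             mas_frecuente = label[padre]
--
--     return mas_frecuente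
-- ===== SOURCE B (Python) =====
-- def _obtener_etiqueta_mas_frecuente(adyacente, padres, label):
--     etiquetas = [label[p] for p in padres[adyacente]]
--     objetivo = max(etiquetas.count(e) for e in etiquetas)
--     acumulado = []
--     for e in etiquetas:
--         acumulado.append(e)
--         if acumulado.count(e) == objetivo:
--             return e
-- ===== Notes on version B (the rewrite author's own statement) =====
-- stated objective: alternative
-- what changed: Replaces A's single interleaved pass (frequency dict updated together with a running most-frequent label) by two separate phases: first compute the maximum frequency among the parents' labels, then rescan left-to-right returning the first label whose running count reaches that maximum (same first-to-reach tie-break).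
import Mathlib
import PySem

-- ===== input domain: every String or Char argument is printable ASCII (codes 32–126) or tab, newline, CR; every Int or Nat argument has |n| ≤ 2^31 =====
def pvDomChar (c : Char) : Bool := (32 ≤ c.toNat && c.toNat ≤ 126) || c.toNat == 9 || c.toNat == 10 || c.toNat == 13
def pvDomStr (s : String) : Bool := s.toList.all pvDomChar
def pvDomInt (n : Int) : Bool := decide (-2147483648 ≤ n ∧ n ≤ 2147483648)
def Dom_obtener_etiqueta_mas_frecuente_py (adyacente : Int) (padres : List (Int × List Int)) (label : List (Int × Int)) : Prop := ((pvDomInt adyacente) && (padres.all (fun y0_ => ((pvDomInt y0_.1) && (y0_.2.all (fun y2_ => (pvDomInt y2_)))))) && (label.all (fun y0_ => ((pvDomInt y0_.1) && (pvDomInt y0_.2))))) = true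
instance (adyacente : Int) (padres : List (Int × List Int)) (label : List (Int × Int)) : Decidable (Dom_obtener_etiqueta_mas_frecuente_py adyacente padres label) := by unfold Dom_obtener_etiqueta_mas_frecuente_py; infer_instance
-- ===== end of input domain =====

-- B replaces A's single interleaved pass (frequency dict + running argmax) by two phases: first compute
-- the maximum frequency among the parents' labels, then rescan left-to-right and return the first label
-- whose running count reaches that maximum (same first-to-reach-the-max tie-break as A); alternative, not faster.

-- ===== PORT A =====
-- one loop iteration of A: update the frequency dict, then the running most-frequent label
def pvStepA (label : List (Int × Int)) (st : PySem.Dict Int Int × Int) (padre : Int) : PySem.Dict Int Int × Int :=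
  let et := (PySem.Dict.mk label).getD padre 0
  let frec := if ((st.1).get? et).isNone then (st.1).insert et 1
              else (st.1).insert et ((st.1).getD et 0 + 1)
  (frec, if frec.getD et 0 > frec.getD st.2 0 then et else st.2)

def obtener_etiqueta_mas_frecuente_py (adyacente : Int) (padres : List (Int × List Int)) (label : List (Int × Int)) : Int :=
  let lista := (PySem.Dict.mk padres).getD adyacente []
  let mas0 := (PySem.Dict.mk label).getD (PySem.List.pyGetD lista 0 0) 0
  (lista.foldl (pvStepA label) (PySem.Dict.mk [], mas0)).2

-- ===== PORT B =====
-- B's second loop: first label whose running count in the accumulated prefix equals objetivo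
def pvAltScan (objetivo : Int) : List Int → List Int → Int
  | _, [] => 0
  | acum, e :: rest =>
    let acum' := acum ++ [e]
    if (PySem.List.count acum' e : Int) = objetivo then e else pvAltScan objetivo acum' rest

def obtener_etiqueta_mas_frecuente_py_alt (adyacente : Int) (padres : List (Int × List Int)) (label : List (Int × Int)) : Int :=
  let etiquetas := ((PySem.Dict.mk padres).getD adyacente []).map (fun p => (PySem.Dict.mk label).getD p 0)
  let objetivo := (PySem.List.max? (etiquetas.map (fun e => (PySem.List.count etiquetas e : Int))) (fun y => y)).getD 0
  pvAltScan objetivo [] etiquetas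

-- ===== PRECONDITION & SPEC =====
-- Pre_ excludes exactly the inputs where A raises: a missing adyacente key or an empty parents list
-- (KeyError/IndexError) and a parent missing from label (KeyError).
def Pre_obtener_etiqueta_mas_frecuente_py (adyacente : Int) (padres : List (Int × List Int)) (label : List (Int × Int)) : Prop :=
  ((PySem.Dict.mk padres).getD adyacente []) ≠ [] ∧
  ∀ p ∈ ((PySem.Dict.mk padres).getD adyacente []), ((PySem.Dict.mk label).get? p).isSome = true
instance (adyacente : Int) (padres : List (Int × List Int)) (label : List (Int × Int)) : Decidable (Pre_obtener_etiqueta_mas_frecuente_py adyacente padres label) := by unfold Pre_obtener_etiqueta_mas_frecuente_py; infer_instance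

def pvWitness_obtener_etiqueta_mas_frecuente_py : Int × (List (Int × List Int)) × (List (Int × Int)) :=
  (0, [(0, [1, 2, 2])], [(1, 5), (2, 7)])

def Spec_obtener_etiqueta_mas_frecuente_py (adyacente : Int) (padres : List (Int × List Int)) (label : List (Int × Int)) (out : Int) : Prop := out = obtener_etiqueta_mas_frecuente_py_alt adyacente padres label
instance (adyacente : Int) (padres : List (Int × List Int)) (label : List (Int × Int)) (out : Int) : Decidable (Spec_obtener_etiqueta_mas_frecuente_py adyacente padres label out) := by unfold Spec_obtener_etiqueta_mas_frecuente_py; infer_instance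

-- ===== CLAIM (what is proved, stated in full; the proofs are below) =====
def Claim_equal_obtener_etiqueta_mas_frecuente_py : Prop := ∀ (adyacente : Int) (padres : List (Int × List Int)) (label : List (Int × Int)), Dom_obtener_etiqueta_mas_frecuente_py adyacente padres label → Pre_obtener_etiqueta_mas_frecuente_py adyacente padres label → Spec_obtener_etiqueta_mas_frecuente_py adyacente padres label (obtener_etiqueta_mas_frecuente_py adyacente padres label)

-- ===== LEMMAS AND PROOFS =====

-- A's loop body after the label lookup (pvStepA label st padre = pvCoreA st (label-of-padre), definitionally)
def pvCoreA (st : PySem.Dict Int Int × Int) (et : Int) : PySem.Dict Int Int × Int :=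
  let frec := if ((st.1).get? et).isNone then (st.1).insert et 1
              else (st.1).insert et ((st.1).getD et 0 + 1)
  (frec, if frec.getD et 0 > frec.getD st.2 0 then et else st.2)

-- A's loop with the dict replaced by prefix counts
def pvPureA : List Int → List Int → Int → Int
  | _, [], mas => mas
  | pre, e :: rest, mas =>
    pvPureA (pre ++ [e]) rest (if (pre ++ [e]).count e > (pre ++ [e]).count mas then e else mas)

-- maximum multiplicity of an element of l
def pvMC (l : List Int) : Nat := l.foldl (fun acc e => max acc (l.count e)) 0

-- does the running count hit m somewhere in l (counts taken in acum ++ prefix)?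
def pvReach (m : Int) : List Int → List Int → Bool
  | _, [] => false
  | acum, e :: rest =>
    let acum' := acum ++ [e]
    ((PySem.List.count acum' e : Int) == m) || pvReach m acum' rest

theorem pvMC_le (l : List Int) (x : Int) : l.count x ≤ pvMC l := by
  by_cases hx : x ∈ l
  · exact (PySem.List.le_foldl_max_nat l (fun e => l.count e) 0).2 x hx
  · simp [List.count_eq_zero_of_not_mem hx]

theorem pvMC_eq_foldl (l : List Int) : pvMC l = (l.map (fun e => l.count e)).foldl max 0 := by
  simp [pvMC, List.foldl_map]

theorem pvMC_mem (l : List Int) (h : l ≠ []) : ∃ x ∈ l, l.count x = pvMC l := by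
  rcases PySem.List.foldl_max_mem (l.map (fun e => l.count e)) 0 with h0 | hm
  · exfalso
    obtain ⟨a, t, rfl⟩ := List.exists_cons_of_ne_nil h
    have h1 : (a :: t).count a ≤ pvMC (a :: t) := pvMC_le _ a
    have h2 : 0 < (a :: t).count a := List.count_pos_iff.mpr (by simp)
    have h3 : pvMC (a :: t) = 0 := by rw [pvMC_eq_foldl, h0]
    omega
  · rw [List.mem_map] at hm
    obtain ⟨x, hx, hcx⟩ := hm
    exact ⟨x, hx, by rw [hcx, pvMC_eq_foldl]⟩

theorem pvMC_append (pre : List Int) (e : Int) :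
    pvMC (pre ++ [e]) = max (pvMC pre) (pre.count e + 1) := by
  have hc : ∀ x : Int, (pre ++ [e]).count x = pre.count x + if e = x then 1 else 0 := by
    intro x; by_cases h : e = x <;> simp [List.count_append, h]
  apply Nat.le_antisymm
  · obtain ⟨y, hy, hcy⟩ := pvMC_mem (pre ++ [e]) (by simp)
    rw [← hcy]
    by_cases hye : y = e
    · subst hye; rw [hc y]; simp
    · rw [hc y]
      have := pvMC_le pre y
      simp [Ne.symm hye] at *
      omega
  · apply max_le
    · by_cases hp : pre = []
      · simp [hp, pvMC]
      · obtain ⟨y, hy, hcy⟩ := pvMC_mem pre hp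
        rw [← hcy]
        calc pre.count y ≤ (pre ++ [e]).count y := by rw [hc y]; omega
        _ ≤ _ := pvMC_le _ y
    · have := pvMC_le (pre ++ [e]) e
      rw [hc e] at this; simp at this; omega
theorem pvScan_of_reach (m : Int) (pre : List Int) :
    ∀ rest s : List Int, pvReach m s pre = true → pvAltScan m s (pre ++ rest) = pvAltScan m s pre := by
  induction pre with
  | nil => intro rest s h; simp [pvReach] at h
  | cons e tl ih =>
    intro rest s h
    simp only [pvReach, Bool.or_eq_true, beq_iff_eq] at h
    simp only [List.cons_append, pvAltScan]
    by_cases hc : (PySem.List.count (s ++ [e]) e : Int) = m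
    · have hc' : (List.count e s : Int) + 1 = m := by
        rw [PySem.List.count_eq] at hc; simpa using hc
      simp [hc']
    · simp only [if_neg hc]
      exact ih rest (s ++ [e]) (by tauto)

theorem pvScan_of_not_reach (m : Int) (pre : List Int) :
    ∀ rest s : List Int, pvReach m s pre = false → pvAltScan m s (pre ++ rest) = pvAltScan m (s ++ pre) rest := by
  induction pre with
  | nil => intro rest s h; simp
  | cons e tl ih =>
    intro rest s h
    simp only [pvReach, Bool.or_eq_false_iff, beq_eq_false_iff_ne, ne_eq] at h
    simp only [List.cons_append, pvAltScan, if_neg h.1]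
    rw [ih rest (s ++ [e]) h.2]
    simp

theorem pvReach_of_count (m : Int) (pre : List Int) (x : Int) :
    ∀ s : List Int, (s.count x : Int) < m → m ≤ (((s ++ pre).count x : Int)) → pvReach m s pre = true := by
  induction pre with
  | nil => intro s h1 h2; simp at h2; omega
  | cons e tl ih =>
    intro s h1 h2
    simp only [pvReach, Bool.or_eq_true, beq_iff_eq]
    by_cases hex : e = x
    · subst hex
      by_cases heq : ((s ++ [e]).count e : Int) = m
      · left; rw [PySem.List.count_eq]; exact heq
      · right
        apply ih (s ++ [e])
        · have : (s ++ [e]).count e = s.count e + 1 := by simp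
          omega
        · have : ((s ++ [e]) ++ tl).count e = (s ++ e :: tl).count e := by
            rw [List.append_assoc]; simp
          omega
    · right
      apply ih (s ++ [e])
      · have : (s ++ [e]).count x = s.count x := by simp [hex]
        omega
      · have : ((s ++ [e]) ++ tl).count x = (s ++ e :: tl).count x := by
          rw [List.append_assoc]; simp
        omega

theorem pvReach_of_lt (m : Int) (pre : List Int) :
    ∀ s : List Int, (∀ x : Int, (((s ++ pre).count x : Int)) < m) → pvReach m s pre = false := by
  induction pre with
  | nil => intro s h; simp [pvReach]
  | cons e tl ih =>
    intro s h
    simp only [pvReach, Bool.or_eq_false_iff, beq_eq_false_iff_ne, ne_eq]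
    constructor
    · intro hq
      rw [PySem.List.count_eq] at hq
      have h1 := h e
      have h2 : (s ++ [e]).count e ≤ (s ++ e :: tl).count e := by
        simp [List.count_append]
      omega
    · apply ih (s ++ [e])
      intro x
      have := h x
      have : ((s ++ [e]) ++ tl).count x = (s ++ e :: tl).count x := by
        rw [List.append_assoc]; simp
      omega
theorem pvFoldA_eq_pureA (l : List Int) :
    ∀ (pre : List Int) (frec : PySem.Dict Int Int) (mas : Int),
      (∀ x : Int, frec.getD x 0 = (pre.count x : Int)) →
      (l.foldl pvCoreA (frec, mas)).2 = pvPureA pre l mas := by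
  induction l with
  | nil => intro pre frec mas hinv; simp [pvPureA]
  | cons e rest ih =>
    intro pre frec mas hinv
    have hfe : (if (frec.get? e).isNone then frec.insert e 1
        else frec.insert e (frec.getD e 0 + 1)) = frec.insert e (frec.getD e 0 + 1) := by
      by_cases hn : (frec.get? e).isNone
      · rw [if_pos hn]
        have h0 : frec.getD e 0 = 0 := by
          rw [PySem.Dict.getD_eq_get?_getD, Option.isNone_iff_eq_none.mp hn]; rfl
        rw [h0]; norm_num
      · rw [if_neg hn]
    have hinv' : ∀ x : Int, (frec.insert e (frec.getD e 0 + 1)).getD x 0 = ((pre ++ [e]).count x : Int) := by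
      intro x
      rw [PySem.Dict.getD_insert]
      by_cases hx : x = e
      · subst hx; simp [hinv x, List.count_append]
      · simp [hx, hinv x, List.count_append, Ne.symm hx]
    have hcond : ((frec.insert e (frec.getD e 0 + 1)).getD mas 0 < (frec.insert e (frec.getD e 0 + 1)).getD e 0)
        ↔ ((pre ++ [e]).count mas < (pre ++ [e]).count e) := by
      rw [hinv' e, hinv' mas, Nat.cast_lt]
    simp only [List.foldl_cons, pvPureA]
    show ((List.foldl pvCoreA (pvCoreA (frec, mas) e) rest)).2 = _
    have hstep : pvCoreA (frec, mas) e =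
        (frec.insert e (frec.getD e 0 + 1),
         if (pre ++ [e]).count e > (pre ++ [e]).count mas then e else mas) := by
      simp only [pvCoreA, hfe, gt_iff_lt]
      refine Prod.ext rfl ?_
      exact if_congr hcond rfl rfl
    rw [hstep]
    exact ih (pre ++ [e]) _ _ hinv'

theorem pvMC_pos (pre : List Int) (h : pre ≠ []) : 1 ≤ pvMC pre := by
  obtain ⟨a, t, rfl⟩ := List.exists_cons_of_ne_nil h
  have h1 := pvMC_le (a :: t) a
  have h2 : 0 < (a :: t).count a := List.count_pos_iff.mpr (by simp)
  omega

theorem pvMain (rest : List Int) :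
    ∀ (pre : List Int) (mas : Int), pre ≠ [] →
      pre.count mas = pvMC pre →
      pvAltScan ((pvMC pre : Nat) : Int) [] pre = mas →
      pvPureA pre rest mas = pvAltScan ((pvMC (pre ++ rest) : Nat) : Int) [] (pre ++ rest) := by
  induction rest with
  | nil => intro pre mas _ _ h3; simp [pvPureA, h3]
  | cons e rest' ih =>
    intro pre mas hpre h2 h3
    set P' := pre ++ [e] with hP'
    set M := pvMC pre with hM
    have hMpos : 1 ≤ M := pvMC_pos pre hpre
    have hMC' : pvMC P' = max M (pre.count e + 1) := pvMC_append pre e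
    have hcntE : P'.count e = pre.count e + 1 := by simp [hP', List.count_append]
    have hboundE : pre.count e ≤ M := pvMC_le pre e
    -- the new-max scan value: when the count of e in P' reaches M+1, the scan of P' returns e
    have hscan_new : pre.count e = M → pvAltScan ((M + 1 : Nat) : Int) [] P' = e := by
      intro hEM
      have hr : pvReach ((M + 1 : Nat) : Int) [] pre = false := by
        apply pvReach_of_lt
        intro x
        have := pvMC_le pre x
        simp only [List.nil_append]
        omega
      have := pvScan_of_not_reach ((M + 1 : Nat) : Int) pre [e] [] hr
      simp only [List.nil_append] at this ⊢
      rw [hP', this]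
      simp only [pvAltScan, PySem.List.count_eq]
      rw [if_pos]
      simp [List.count_append]
      push_cast
      omega
    by_cases he : e = mas
    · -- processing mas again: its count goes to M + 1, new maximum, mas kept
      subst he
      have hcnt' : P'.count e = M + 1 := by omega
      have hM' : pvMC P' = M + 1 := by omega
      have hgt : ¬ (P'.count e > P'.count e) := by omega
      show pvPureA (pre ++ [e]) rest' (if (pre ++ [e]).count e > (pre ++ [e]).count e then e else e)
          = _
      rw [if_neg hgt]
      rw [show pre ++ e :: rest' = P' ++ rest' from by simp [hP']]
      apply ih P' e (by simp [hP']) (by omega)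
      rw [hM', hscan_new (by omega)]
    · have hcntM : P'.count mas = pre.count mas := by simp [hP', List.count_append, he]
      show pvPureA P' rest' (if P'.count e > P'.count mas then e else mas) = _
      rw [show pre ++ e :: rest' = P' ++ rest' from by simp [hP']]
      by_cases hgt : P'.count e > P'.count mas
      · -- e becomes the new unique maximum
        have hEM : pre.count e = M := by omega
        have hM' : pvMC P' = M + 1 := by omega
        rw [if_pos hgt]
        apply ih P' e (by simp [hP']) (by omega)
        rw [hM', hscan_new hEM]
      · -- maximum unchanged, mas keeps it
        have hM' : pvMC P' = M := by omega
        rw [if_neg hgt]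
        apply ih P' mas (by simp [hP']) (by omega)
        rw [hM']
        have hr : pvReach ((M : Nat) : Int) [] pre = true := by
          apply pvReach_of_count _ _ mas
          · simp; omega
          · simp; omega
        have := pvScan_of_reach ((M : Nat) : Int) pre [e] [] hr
        simp only [List.nil_append] at this ⊢
        rw [hP', this, h3]

theorem pvObjetivo_eq (e0 : Int) (tl : List Int) :
    ((PySem.List.max? ((e0 :: tl).map (fun e => (PySem.List.count (e0 :: tl) e : Int))) (fun y => y)).getD 0)
      = ((pvMC (e0 :: tl) : Nat) : Int) := by
  set l := e0 :: tl with hl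
  set c : Int → Int := fun e => (l.count e : Int) with hc
  have hmap : l.map (fun e => (PySem.List.count l e : Int)) = c e0 :: tl.map c := by
    simp [hl, hc, PySem.List.count_eq]
  rw [hmap, PySem.List.max?_id_cons]
  simp only [Option.getD_some]
  set m := (tl.map c).foldl max (c e0) with hm
  have hub := PySem.List.le_foldl_max (tl.map c) (c e0)
  apply le_antisymm
  · rcases PySem.List.foldl_max_mem (tl.map c) (c e0) with h0 | hmem
    · rw [← hm] at h0
      rw [h0, hc]
      show ((l.count e0 : Nat) : Int) ≤ _
      exact_mod_cast pvMC_le l e0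
    · rw [← hm] at hmem
      obtain ⟨x, hx, hcx⟩ := List.mem_map.mp hmem
      rw [← hcx, hc]
      show ((l.count x : Nat) : Int) ≤ _
      exact_mod_cast pvMC_le l x
  · obtain ⟨y, hy, hcy⟩ := pvMC_mem l (by simp [hl])
    rw [← hcy]
    rcases List.mem_cons.mp (hl ▸ hy) with rfl | hyt
    · exact_mod_cast hub.1
    · exact_mod_cast hub.2 (c y) (List.mem_map.mpr ⟨y, hyt, rfl⟩)

-- ===== VERDICT (by name: the statement is the Claim_ definition above) =====
theorem obtener_etiqueta_mas_frecuente_py_spec : Claim_equal_obtener_etiqueta_mas_frecuente_py := by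
  intro adyacente padres label _ hPre
  unfold Spec_obtener_etiqueta_mas_frecuente_py
  unfold Pre_obtener_etiqueta_mas_frecuente_py at hPre
  obtain ⟨hne, -⟩ := hPre
  unfold obtener_etiqueta_mas_frecuente_py obtener_etiqueta_mas_frecuente_py_alt
  simp only []
  set lbl : Int → Int := fun p => (PySem.Dict.mk label).getD p 0 with hlbl
  set lista := (PySem.Dict.mk padres).getD adyacente [] with hlista
  obtain ⟨h', t', hlc⟩ := List.exists_cons_of_ne_nil hne
  have hmas0 : (PySem.Dict.mk label).getD (PySem.List.pyGetD lista 0 0) 0 = lbl h' := by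
    rw [PySem.List.pyGetD_zero, hlc]; rfl
  have hfoldA : (lista.foldl (pvStepA label) (PySem.Dict.mk [], lbl h')).2
      = pvPureA [] (lista.map lbl) (lbl h') := by
    have h1 : lista.foldl (pvStepA label) (PySem.Dict.mk [], lbl h')
        = (lista.map lbl).foldl pvCoreA (PySem.Dict.mk [], lbl h') := by
      rw [List.foldl_map]
      rfl
    rw [h1]
    apply pvFoldA_eq_pureA
    intro x
    simp [PySem.Dict.getD_eq_get?_getD]
    rfl
  rw [hmas0, hfoldA]
  set e0 := lbl h' with he0
  set tl := t'.map lbl with htl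
  have hets : lista.map lbl = e0 :: tl := by rw [hlc]; rfl
  rw [hets, pvObjetivo_eq e0 tl]
  have hstep1 : pvPureA [] (e0 :: tl) e0 = pvPureA [e0] tl e0 := by
    simp [pvPureA]
  rw [hstep1]
  have hMC1 : pvMC [e0] = 1 := by simp [pvMC]
  have := pvMain tl [e0] e0 (by simp) (by simp [hMC1]) ?_
  · simpa using this
  · rw [hMC1]
    simp [pvAltScan, PySem.List.count_eq]
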